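-- pv_equiv track=rewrite | github.com/telepist/c64-rom-collector | src/utils/name_cleaner.py | get_region_priority
-- ===== SOURCE A (Python) =====
-- def get_region_priority(region):
--     """
--     Get the priority value for a region.
--
--     Args:
--         region (str): The region string
--
--     Returns:
--         int: The priority value (higher is better)
--     """
--     # Define region priorities here to avoid circular imports
--     REGION_PRIORITIES = {
--         'Europe': 6,     # Europe releases (highest priority)
--         'PAL': 5,        # PAL-specific releases
--         'World': 4,      # World releases
--         'USA': 3,        # USA releases
--         'Japan': 2,      # Japan releases
--         'NTSC': 1,       # NTSC-specific releases
--         '': 0            # No region specified (lowest priority)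
--     }
--
--     # Check exact matches first
--     if region in REGION_PRIORITIES:
--         return REGION_PRIORITIES[region]
--
--     # Check for partial matches (e.g., "USA, Europe" should match "USA")
--     for priority_region in sorted(REGION_PRIORITIES.keys(), key=lambda x: REGION_PRIORITIES[x], reverse=True):
--         if priority_region and priority_region in region:
--             return REGION_PRIORITIES[priority_region]
--
--     return REGION_PRIORITIES.get('', 0)
-- ===== SOURCE B (Python) =====
-- def get_region_priority(region):
--     """
--     Get the priority value for a region.
--
--     Args:
--         region (str): The region string
--
--     Returns:
--         int: The priority value (higher is better)
--     """
--     REGION_PRIORITIES = {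
--         'Europe': 6,
--         'PAL': 5,
--         'World': 4,
--         'USA': 3,
--         'Japan': 2,
--         'NTSC': 1,
--         '': 0
--     }
--     matches = [p for k, p in REGION_PRIORITIES.items() if k and k in region]
--     return max(matches) if matches else 0
-- ===== Notes on version B (the rewrite author's own statement) =====
-- stated objective: simpler
-- what changed: Replaced the exact-match dict shortcut plus the priority-sorted early-exit loop with a single filter of substring-matching nonempty keys followed by max (default 0); exact matches are subsumed by substring matches and the distinct priorities make first-match-in-descending-order equal to max.
import Mathlib
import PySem

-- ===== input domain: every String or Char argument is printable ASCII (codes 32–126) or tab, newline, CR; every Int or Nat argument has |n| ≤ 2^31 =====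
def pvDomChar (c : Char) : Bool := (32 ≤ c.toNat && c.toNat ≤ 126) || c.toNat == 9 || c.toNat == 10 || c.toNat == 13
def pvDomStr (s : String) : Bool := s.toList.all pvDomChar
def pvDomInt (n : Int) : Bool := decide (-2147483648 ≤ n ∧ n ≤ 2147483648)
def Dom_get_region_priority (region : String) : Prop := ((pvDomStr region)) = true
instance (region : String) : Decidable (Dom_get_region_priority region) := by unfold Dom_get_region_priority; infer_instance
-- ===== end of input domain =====

-- B drops A's exact-match shortcut and priority-sorted early-exit loop: it filters the
-- nonempty keys that are substrings of region and returns their max priority (default 0) — simpler.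

-- ===== PORT A =====
def pvRegionPriorities : PySem.Dict String Int :=
  PySem.Dict.ofList
    [("Europe", 6), ("PAL", 5), ("World", 4), ("USA", 3), ("Japan", 2), ("NTSC", 1), ("", 0)]

def get_region_priority (region : String) : Int :=
  -- if region in REGION_PRIORITIES: return REGION_PRIORITIES[region]
  if pvRegionPriorities.contains region then
    (pvRegionPriorities.get? region).getD 0  -- guarded by contains: exactly REGION_PRIORITIES[region]
  else
    -- for priority_region in sorted(keys, key=..., reverse=True): early-exit loop as Option fold
    let sortedKeys :=
      PySem.List.sorted pvRegionPriorities.keys (fun x => pvRegionPriorities.getD x 0) true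
    let res := sortedKeys.foldl
      (fun acc k =>
        match acc with
        | some v => some v
        | none =>
          if k ≠ "" ∧ PySem.Str.isIn k region then some (pvRegionPriorities.getD k 0)
          else none)
      none
    match res with
    | some v => v
    | none => pvRegionPriorities.getD "" 0

-- ===== PORT B =====
def get_region_priority_alt (region : String) : Int :=
  let matched :=
    (pvRegionPriorities.items.filter (fun kv => kv.1 ≠ "" ∧ PySem.Str.isIn kv.1 region)).map
      Prod.snd
  if matched ≠ [] then (PySem.List.max? matched (fun x => x)).getD 0 else 0

-- ===== PRECONDITION & SPEC =====
def Spec_get_region_priority (region : String) (out : Int) : Prop := out = get_region_priority_alt region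
instance (region : String) (out : Int) : Decidable (Spec_get_region_priority region out) := by unfold Spec_get_region_priority; infer_instance

-- ===== CLAIM (what is proved, stated in full; the proofs are below) =====
def Claim_equal_get_region_priority : Prop := ∀ (region : String), Dom_get_region_priority region → Spec_get_region_priority region (get_region_priority region)

-- ===== LEMMAS AND PROOFS =====

theorem pv_main (region : String) :
    get_region_priority region = get_region_priority_alt region := by
  by_cases hc : pvRegionPriorities.contains region
  · -- region is one of the seven literal keys
    have hmem : region ∈ pvRegionPriorities.keys := by
      have := (PySem.Dict.contains_eq_decide_mem_keys pvRegionPriorities region)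
      rw [this] at hc
      exact of_decide_eq_true hc
    simp only [pvRegionPriorities, PySem.Dict.ofList] at hmem
    fin_cases hmem <;> decide
  · have hk : PySem.List.sorted pvRegionPriorities.keys
        (fun x => pvRegionPriorities.getD x 0) true
        = ["Europe", "PAL", "World", "USA", "Japan", "NTSC", ""] := by decide
    have hi : pvRegionPriorities.items
        = [("Europe", (6 : Int)), ("PAL", 5), ("World", 4), ("USA", 3), ("Japan", 2),
           ("NTSC", 1), ("", 0)] := by decide
    have g1 : pvRegionPriorities.getD "Europe" 0 = 6 := by decide
    have g2 : pvRegionPriorities.getD "PAL" 0 = 5 := by decide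
    have g3 : pvRegionPriorities.getD "World" 0 = 4 := by decide
    have g4 : pvRegionPriorities.getD "USA" 0 = 3 := by decide
    have g5 : pvRegionPriorities.getD "Japan" 0 = 2 := by decide
    have g6 : pvRegionPriorities.getD "NTSC" 0 = 1 := by decide
    have g0 : pvRegionPriorities.getD "" 0 = 0 := by decide
    unfold get_region_priority get_region_priority_alt
    rw [if_neg hc, hk, hi]
    by_cases h1 : PySem.Str.isIn "Europe" region <;>
    by_cases h2 : PySem.Str.isIn "PAL" region <;>
    by_cases h3 : PySem.Str.isIn "World" region <;>
    by_cases h4 : PySem.Str.isIn "USA" region <;>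
    by_cases h5 : PySem.Str.isIn "Japan" region <;>
    by_cases h6 : PySem.Str.isIn "NTSC" region <;>
      simp [PySem.Str.isIn] at h1 h2 h3 h4 h5 h6 <;>
      simp [List.foldl, List.filter, PySem.List.max?, h1, h2, h3, h4, h5, h6,
        g1, g2, g3, g4, g5, g6, g0]

-- ===== VERDICT (by name: the statement is the Claim_ definition above) =====
theorem get_region_priority_spec : Claim_equal_get_region_priority := by
  intro region _
  unfold Spec_get_region_priority
  exact pv_main region
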